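-- pv_equiv track=rewrite | github.com/UESTC-GQJ/TKRE | codes/traditional_re/mslm_model.py | find_token_span
-- ===== SOURCE A (Python) =====
-- from typing import Dict, List, Tuple
--
-- def find_token_span(input_ids: List[int], target_ids: List[int]) -> List[int]:
--     """
--     在input_ids中查找target_ids的起始和结束位置。
--     返回所有属于target的索引列表。
--     """
--     if not target_ids:
--         return []
--
--     span_indices = []
--     n = len(input_ids)
--     m = len(target_ids)
--
--     # 简单的滑动窗口搜索
--     for i in range(n - m + 1):
--         if input_ids[i:i+m] == target_ids:
--             span_indices.extend(list(range(i, i+m)))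
--             break
--     return span_indices
-- ===== SOURCE B (Python) =====
-- def find_token_span(input_ids, target_ids):
--     # Rolling-sum (Rabin-Karp style) scan: keep the sum of the current window,
--     # compare slices only when the sums agree.
--     m = len(target_ids)
--     if m == 0:
--         return []
--     n = len(input_ids)
--     if n < m:
--         return []
--     t_sum = sum(target_ids)
--     w_sum = sum(input_ids[:m])
--     i = 0
--     while True:
--         if w_sum == t_sum and input_ids[i:i + m] == target_ids:
--             return list(range(i, i + m))
--         if i + m >= n:
--             return []
--         w_sum += input_ids[i + m] - input_ids[i]
--         i += 1
-- ===== Notes on version B (the rewrite author's own statement) =====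
-- stated objective: alternative
-- what changed: Replaced the slice-comparison sliding window with a Rabin-Karp-style rolling window sum that filters candidate positions in O(1) and only compares a slice when the sums match.
import Mathlib
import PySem

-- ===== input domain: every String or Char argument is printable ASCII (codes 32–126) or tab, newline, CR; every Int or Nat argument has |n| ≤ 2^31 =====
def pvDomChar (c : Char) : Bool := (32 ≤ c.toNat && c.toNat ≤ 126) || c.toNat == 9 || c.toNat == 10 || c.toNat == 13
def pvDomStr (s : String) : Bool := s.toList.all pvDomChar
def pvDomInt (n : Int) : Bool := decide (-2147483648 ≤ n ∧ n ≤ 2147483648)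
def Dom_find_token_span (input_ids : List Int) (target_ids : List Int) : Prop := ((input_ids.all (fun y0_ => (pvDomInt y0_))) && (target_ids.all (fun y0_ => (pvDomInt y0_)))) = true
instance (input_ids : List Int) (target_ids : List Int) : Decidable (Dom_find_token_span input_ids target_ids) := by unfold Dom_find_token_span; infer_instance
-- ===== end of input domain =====

-- B replaces A's slice-comparing sliding window by a rolling-window-sum scan
-- (compare a slice only when the window sum equals the target sum); equal results proved.

-- ===== PORT A =====
-- the 'for i in range(n-m+1): if input_ids[i:i+m]==target_ids: extend; break' loop
def ftsLoopA (inp tgt : List Int) : List Int → List Int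
  | [] => []
  | i :: rest =>
      if PySem.List.slice inp (some i) (some (i + (tgt.length : Int))) = tgt then
        PySem.List.pyRange i (i + (tgt.length : Int)) 1
      else ftsLoopA inp tgt rest

def find_token_span (input_ids : List Int) (target_ids : List Int) : List Int :=
  if target_ids = [] then []
  else
    let n : Int := input_ids.length
    let m : Int := target_ids.length
    ftsLoopA input_ids target_ids (PySem.List.pyRange 0 (n - m + 1) 1)

-- ===== PORT B =====
-- the 'while True' rolling-sum loop; k is the number of slides left (n - m - i)
def ftsGoB (inp tgt : List Int) (tsum : Int) (i : Nat) (wsum : Int) (k : Nat) : List Int :=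
  if wsum = tsum ∧
      PySem.List.slice inp (some (i : Int)) (some ((i : Int) + (tgt.length : Int))) = tgt then
    PySem.List.pyRange (i : Int) ((i : Int) + (tgt.length : Int)) 1
  else
    match k with
    | 0 => []
    | k' + 1 =>
        ftsGoB inp tgt tsum (i + 1)
          (wsum + PySem.List.pyGetD inp ((i : Int) + (tgt.length : Int)) 0
                - PySem.List.pyGetD inp (i : Int) 0) k'
termination_by k

def find_token_span_alt (input_ids : List Int) (target_ids : List Int) : List Int :=
  let m := target_ids.length
  if m = 0 then []
  else
    let n := input_ids.length
    if n < m then []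
    else
      ftsGoB input_ids target_ids target_ids.sum 0
        (PySem.List.slice input_ids none (some (m : Int))).sum (n - m)

-- ===== PRECONDITION & SPEC =====
def Spec_find_token_span (input_ids : List Int) (target_ids : List Int) (out : List Int) : Prop := out = find_token_span_alt input_ids target_ids
instance (input_ids : List Int) (target_ids : List Int) (out : List Int) : Decidable (Spec_find_token_span input_ids target_ids out) := by unfold Spec_find_token_span; infer_instance

-- ===== CLAIM (what is proved, stated in full; the proofs are below) =====
def Claim_equal_find_token_span : Prop := ∀ (input_ids : List Int) (target_ids : List Int), Dom_find_token_span input_ids target_ids → Spec_find_token_span input_ids target_ids (find_token_span input_ids target_ids)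

-- ===== LEMMAS AND PROOFS =====

lemma find_token_span_eq (inp tgt : List Int) :
    find_token_span inp tgt = if tgt = [] then []
      else ftsLoopA inp tgt
        (PySem.List.pyRange 0 ((inp.length : Int) - (tgt.length : Int) + 1) 1) := rfl

lemma find_token_span_alt_eq (inp tgt : List Int) :
    find_token_span_alt inp tgt = if tgt.length = 0 then []
      else if inp.length < tgt.length then []
      else ftsGoB inp tgt tgt.sum 0
        (PySem.List.slice inp none (some ((tgt.length : Nat) : Int))).sum
        (inp.length - tgt.length) := rfl

-- the window at position i, as a list
def ftsWin (inp : List Int) (i m : Nat) : List Int := (inp.drop i).take m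

lemma ftsWin_slice (inp : List Int) (i m : Nat) :
    PySem.List.slice inp (some (i : Int)) (some ((i : Int) + (m : Int))) = ftsWin inp i m := by
  simpa [ftsWin] using PySem.List.slice_natCast_add inp i m

-- sliding the window one step to the right shifts the sum by inp[i+m] - inp[i]
lemma ftsWin_sum_slide (inp : List Int) (i m : Nat) (h : i + m < inp.length) (hm : 0 < m) :
    (ftsWin inp i m).sum + PySem.List.pyGetD inp ((i : Int) + (m : Int)) 0
        - PySem.List.pyGetD inp (i : Int) 0 = (ftsWin inp (i + 1) m).sum := by
  obtain ⟨t, rfl⟩ : ∃ t, m = t + 1 := ⟨m - 1, by omega⟩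
  have hi : i < inp.length := by omega
  have hdi : inp.drop i = inp[i] :: inp.drop (i + 1) := List.drop_eq_getElem_cons hi
  have htk : (inp.drop (i + 1)).take (t + 1)
      = (inp.drop (i + 1)).take t ++ (inp.drop (i + 1))[t]?.toList := List.take_add_one
  have hget : (inp.drop (i + 1))[t]? = some inp[i + 1 + t] := by
    rw [List.getElem?_drop]
    exact List.getElem?_eq_getElem (by omega)
  have h1 : PySem.List.pyGetD inp ((i : Int) + (((t + 1 : Nat)) : Int)) 0 = inp[i + 1 + t] := by
    have : ((i : Int) + (((t + 1 : Nat)) : Int)) = ((i + 1 + t : Nat) : Int) := by push_cast; ring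
    rw [this, PySem.List.pyGetD_natCast]
    exact List.getD_eq_getElem _ _ (by omega)
  have h2 : PySem.List.pyGetD inp (i : Int) 0 = inp[i] := by
    rw [PySem.List.pyGetD_natCast]
    exact List.getD_eq_getElem _ _ hi
  simp only [ftsWin] at *
  rw [hdi, htk, hget, h1, h2, List.take_succ_cons]
  simp only [List.sum_cons, List.sum_append, Option.toList_some, List.sum_nil]
  ring

-- main invariant: B's rolling loop at position i equals A's loop over the remaining indices
lemma fts_loop_eq (inp tgt : List Int) (hm : 0 < tgt.length) :
    ∀ (k i : Nat), i + tgt.length ≤ inp.length → k = inp.length - tgt.length - i →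
      ftsGoB inp tgt tgt.sum i (ftsWin inp i tgt.length).sum k
        = ftsLoopA inp tgt
            (PySem.List.pyRange (i : Int) ((inp.length : Int) - (tgt.length : Int) + 1) 1) := by
  intro k
  induction k with
  | zero =>
      intro i hle hk
      have hi : i = inp.length - tgt.length := by omega
      have hlt : (i : Int) < (inp.length : Int) - (tgt.length : Int) + 1 := by
        have : (i : Int) = (inp.length : Int) - (tgt.length : Int) := by
          subst hi; omega
        omega
      rw [PySem.List.pyRange_one_cons hlt]
      rw [ftsGoB, ftsLoopA]
      rw [ftsWin_slice]
      by_cases hs : ftsWin inp i tgt.length = tgt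
      · rw [if_pos ⟨by rw [hs], hs⟩, if_pos hs]
      · rw [if_neg (fun h => hs h.2), if_neg hs]
        rw [PySem.List.pyRange_one_eq_nil (by
          have : (i : Int) = (inp.length : Int) - (tgt.length : Int) := by
            subst hi; omega
          omega)]
        rfl
  | succ k ih =>
      intro i hle hk
      have hlt : (i : Int) < (inp.length : Int) - (tgt.length : Int) + 1 := by
        have : (i : Int) ≤ (inp.length : Int) - (tgt.length : Int) := by omega
        omega
      rw [PySem.List.pyRange_one_cons hlt]
      rw [ftsGoB, ftsLoopA]
      rw [ftsWin_slice]
      by_cases hs : ftsWin inp i tgt.length = tgt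
      · rw [if_pos ⟨by rw [hs], hs⟩, if_pos hs]
      · rw [if_neg (fun h => hs h.2), if_neg hs]
        have hb : i + tgt.length < inp.length := by omega
        rw [ftsWin_sum_slide inp i tgt.length hb hm]
        have := ih (i + 1) (by omega) (by omega)
        simpa [Nat.cast_add] using this

-- ===== VERDICT (by name: the statement is the Claim_ definition above) =====
theorem find_token_span_spec : Claim_equal_find_token_span := by
  intro inp tgt _
  unfold Spec_find_token_span
  rw [find_token_span_eq, find_token_span_alt_eq]
  by_cases h0 : tgt = []
  · simp [h0]
  · have hm : 0 < tgt.length := List.length_pos_iff.mpr h0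
    rw [if_neg h0, if_neg (by omega)]
    by_cases hn : inp.length < tgt.length
    · rw [if_pos hn]
      rw [PySem.List.pyRange_one_eq_nil (by omega)]
      rfl
    · rw [if_neg hn]
      have hinit : (PySem.List.slice inp none (some ((tgt.length : Nat) : Int))).sum
          = (ftsWin inp 0 tgt.length).sum := by
        rw [PySem.List.slice_to_natCast]; simp [ftsWin]
      rw [hinit]
      have := fts_loop_eq inp tgt hm (inp.length - tgt.length) 0 (by omega) (by omega)
      simpa using this.symm
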